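-- pv_equiv track=rewrite | github.com/jplag/JPlag | .github/workflows/scripts/matchRecordToInterface.py | extractRecordVariables
-- ===== SOURCE A (Python) =====
-- def extractRecordVariables(text):
--     variables = []
--     current_variable = ''
--     open_brackets = 0
--     for char in text:
--         if char == '(' or char == '{' or char == '[' or char == '<':
--             open_brackets += 1
--             current_variable += char
--         elif char == ')' or char == '}' or char == ']' or char == '>':
--             open_brackets -= 1
--             current_variable += char
--         elif char == ',' and open_brackets == 0:
--             variables.append(current_variable.strip())
--             current_variable = ''
--         else:
--             current_variable += char
--     variables.append(current_variable.strip())  # Add the last variable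
--     return variables
-- ===== SOURCE B (Python) =====
-- def _balance(part):
--     bal = 0
--     for ch in part:
--         if ch in '({[<':
--             bal += 1
--         elif ch in ')}]>':
--             bal -= 1
--     return bal
--
--
-- def extractRecordVariables(text):
--     parts = text.split(',')
--     variables = []
--     buffer = parts[0]
--     balance = _balance(parts[0])
--     for part in parts[1:]:
--         if balance == 0:
--             variables.append(buffer.strip())
--             buffer = part
--         else:
--             buffer = buffer + ',' + part
--         balance += _balance(part)
--     variables.append(buffer.strip())
--     return variables
-- ===== Notes on version B (the rewrite author's own statement) =====
-- stated objective: faster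
-- what changed: A accumulates characters one at a time (quadratic-feeling string appends in Python), emitting at each top-level comma; B first tokenizes the text with the built-in comma split and then merges the parts back with a running bracket balance, emitting a stripped buffer whenever the cumulative balance is zero at a part boundary.
import Mathlib
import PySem

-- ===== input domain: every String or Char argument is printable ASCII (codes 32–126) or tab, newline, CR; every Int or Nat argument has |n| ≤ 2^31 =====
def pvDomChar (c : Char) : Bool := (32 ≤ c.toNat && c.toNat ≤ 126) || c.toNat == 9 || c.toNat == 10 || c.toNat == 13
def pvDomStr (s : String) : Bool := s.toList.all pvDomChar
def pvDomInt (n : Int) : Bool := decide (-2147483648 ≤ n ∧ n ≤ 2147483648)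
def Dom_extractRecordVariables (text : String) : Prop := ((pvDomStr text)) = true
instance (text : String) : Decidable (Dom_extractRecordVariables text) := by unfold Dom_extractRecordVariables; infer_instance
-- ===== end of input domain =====

-- B replaces A's single char-by-char accumulation loop by a two-phase pass: split on ',' first,
-- then merge the parts back while tracking a running bracket balance (measured faster by a constant factor: the split runs at C speed).

-- ===== PORT A =====
-- one step of A's for-loop over the characters; state = (variables, current_variable, open_brackets)
def pvStepA (st : List String × List Char × Int) (c : Char) : List String × List Char × Int :=
  if c = '(' ∨ c = '{' ∨ c = '[' ∨ c = '<' then (st.1, st.2.1 ++ [c], st.2.2 + 1)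
  else if c = ')' ∨ c = '}' ∨ c = ']' ∨ c = '>' then (st.1, st.2.1 ++ [c], st.2.2 - 1)
  else if c = ',' ∧ st.2.2 = 0 then (st.1 ++ [String.mk (PySem.Chars.strip st.2.1)], [], st.2.2)
  else (st.1, st.2.1 ++ [c], st.2.2)

def extractRecordVariables (text : String) : List String :=
  let s := text.toList.foldl pvStepA ([], [], 0)
  s.1 ++ [String.mk (PySem.Chars.strip s.2.1)]  -- append the last variable

-- ===== PORT B =====
-- text.split(',') ported by hand on List Char (exact: empty text -> [[]], empty segments kept)
def pvSplitComma : List Char → List (List Char)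
  | [] => [[]]
  | c :: cs =>
    let r := pvSplitComma cs
    if c = ',' then [] :: r else (c :: r.headI) :: r.tail

-- Source B's _balance helper
def pvStepBal (bal : Int) (ch : Char) : Int :=
  if ch = '(' ∨ ch = '{' ∨ ch = '[' ∨ ch = '<' then bal + 1
  else if ch = ')' ∨ ch = '}' ∨ ch = ']' ∨ ch = '>' then bal - 1
  else bal

def pvBalance (cs : List Char) : Int := cs.foldl pvStepBal 0

-- Source B's merge loop over parts[1:]; state = (variables, buffer, balance)
def pvGoB : List (List Char) → List String → List Char → Int → List String
  | [], vars, buf, _ => vars ++ [String.mk (PySem.Chars.strip buf)]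
  | p :: ps, vars, buf, bal =>
    if bal = 0 then pvGoB ps (vars ++ [String.mk (PySem.Chars.strip buf)]) p (bal + pvBalance p)
    else pvGoB ps vars (buf ++ ',' :: p) (bal + pvBalance p)

def extractRecordVariables_alt (text : String) : List String :=
  let parts := pvSplitComma text.toList
  pvGoB parts.tail [] parts.headI (pvBalance parts.headI)

-- ===== PRECONDITION & SPEC =====
def Spec_extractRecordVariables (text : String) (out : List String) : Prop := out = extractRecordVariables_alt text
instance (text : String) (out : List String) : Decidable (Spec_extractRecordVariables text out) := by unfold Spec_extractRecordVariables; infer_instance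

-- ===== CLAIM (what is proved, stated in full; the proofs are below) =====
def Claim_equal_extractRecordVariables : Prop := ∀ (text : String), Dom_extractRecordVariables text → Spec_extractRecordVariables text (extractRecordVariables text)

-- ===== LEMMAS AND PROOFS =====

lemma pvSplitComma_ne_nil (cs : List Char) : pvSplitComma cs ≠ [] := by
  cases cs with
  | nil => simp [pvSplitComma]
  | cons c cs => simp only [pvSplitComma]; split <;> simp

lemma pvBalance_shift (l : List Char) (a : Int) : l.foldl pvStepBal a = a + pvBalance l := by
  induction l generalizing a with
  | nil => simp [pvBalance]
  | cons c l ih =>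
    simp only [pvBalance, List.foldl_cons] at *
    rw [ih (pvStepBal a c), ih (pvStepBal 0 c)]
    unfold pvStepBal
    split_ifs <;> omega

lemma pvBalance_cons (c : Char) (l : List Char) :
    pvBalance (c :: l) = pvStepBal 0 c + pvBalance l := by
  simp only [pvBalance, List.foldl_cons]
  exact pvBalance_shift l (pvStepBal 0 c)

-- the main invariant: running A's loop from any state equals B's merge loop on the comma-split
lemma pvKey : ∀ (cs : List Char) (vars : List String) (buf : List Char) (bal : Int)
    (h t : _) (hs : pvSplitComma cs = h :: t),
    (let s := cs.foldl pvStepA (vars, buf, bal)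
     s.1 ++ [String.mk (PySem.Chars.strip s.2.1)])
    = pvGoB t vars (buf ++ h) (bal + pvBalance h) := by
  intro cs
  induction cs with
  | nil =>
    intro vars buf bal h t hs
    simp only [pvSplitComma] at hs
    cases hs
    simp [pvGoB]
  | cons c cs ih =>
    intro vars buf bal h t hs
    obtain ⟨h', t', hs'⟩ : ∃ h' t', pvSplitComma cs = h' :: t' := by
      cases e : pvSplitComma cs with
      | nil => exact absurd e (pvSplitComma_ne_nil cs)
      | cons a b => exact ⟨a, b, rfl⟩
    simp only [pvSplitComma, hs'] at hs
    by_cases hc : c = ','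
    · simp only [hc] at hs
      cases hs
      subst hc
      -- A's step on ',' : comma is not a bracket
      simp only [List.foldl_cons, pvStepA]
      simp only [List.append_nil, pvBalance, List.foldl_nil, add_zero]
      by_cases hb : bal = 0
      · subst hb
        simp only [pvGoB]
        rw [if_neg (by decide), if_neg (by decide), if_pos (by simp)]
        have := ih (vars ++ [String.mk (PySem.Chars.strip buf)]) [] 0 h' t' hs'
        simp only [List.nil_append] at this
        exact this
      · simp only [pvGoB]
        rw [if_neg (by decide), if_neg (by decide), if_neg (by simp [hb])]
        rw [if_neg hb]
        have := ih vars (buf ++ [',']) bal h' t' hs'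
        simpa only [List.append_assoc, List.singleton_append] using this
    · simp only [if_neg hc] at hs
      cases hs
      simp only [List.headI, List.tail_cons] at *
      rw [pvBalance_cons]
      simp only [List.foldl_cons, pvStepA]
      by_cases h1 : c = '(' ∨ c = '{' ∨ c = '[' ∨ c = '<'
      · rw [if_pos h1]
        have := ih vars (buf ++ [c]) (bal + 1) h' t' hs'
        rw [this]
        have hd : pvStepBal 0 c = 1 := by
          unfold pvStepBal; rw [if_pos h1]; omega
        rw [hd]
        rw [show bal + (1 + pvBalance h') = bal + 1 + pvBalance h' from by ring]
        simpa only [List.append_assoc, List.singleton_append] using this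
      · rw [if_neg h1]
        by_cases h2 : c = ')' ∨ c = '}' ∨ c = ']' ∨ c = '>'
        · rw [if_pos h2]
          have := ih vars (buf ++ [c]) (bal - 1) h' t' hs'
          rw [this]
          have hd : pvStepBal 0 c = -1 := by
            unfold pvStepBal; rw [if_neg h1, if_pos h2]; omega
          rw [hd]
          rw [show bal + (-1 + pvBalance h') = bal - 1 + pvBalance h' from by ring]
          simpa only [List.append_assoc, List.singleton_append] using this
        · rw [if_neg h2, if_neg (by simp [hc])]
          have := ih vars (buf ++ [c]) bal h' t' hs'
          rw [this]
          have hd : pvStepBal 0 c = 0 := by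
            unfold pvStepBal; rw [if_neg h1, if_neg h2]
          rw [hd]
          rw [show bal + (0 + pvBalance h') = bal + pvBalance h' from by ring]
          simpa only [List.append_assoc, List.singleton_append] using this

-- ===== VERDICT (by name: the statement is the Claim_ definition above) =====
theorem extractRecordVariables_spec : Claim_equal_extractRecordVariables := by
  intro text _
  unfold Spec_extractRecordVariables extractRecordVariables extractRecordVariables_alt
  obtain ⟨h, t, hs⟩ : ∃ h t, pvSplitComma text.toList = h :: t := by
    cases e : pvSplitComma text.toList with
    | nil => exact absurd e (pvSplitComma_ne_nil _)
    | cons a b => exact ⟨a, b, rfl⟩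
  have := pvKey text.toList [] [] 0 h t hs
  simp only [List.nil_append, zero_add] at this
  rw [hs]
  simpa using this
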